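-- pv_equiv track=rewrite | github.com/DanekDanka/speech_intelligibility_assessment | src_STOI/train_partly.py | split_train_indices_into_segments
-- ===== SOURCE A (Python) =====
-- from typing import Any, Dict, List, Sequence, Tuple
--
-- def split_train_indices_into_segments(
--     perm: Sequence[int], n_segments: int
-- ) -> List[List[int]]:
--     """Ровно n_segments блоков; длины отличаются не более чем на 1."""
--     n = len(perm)
--     if n == 0:
--         return [[] for _ in range(n_segments)]
--     base = n // n_segments
--     rem = n % n_segments
--     out: List[List[int]] = []
--     off = 0
--     for s in range(n_segments):
--         ln = base + (1 if s < rem else 0)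
--         out.append(list(perm[off : off + ln]))
--         off += ln
--     return out
-- ===== SOURCE B (Python) =====
-- from typing import List, Sequence
--
-- def split_train_indices_into_segments(
--     perm: Sequence[int], n_segments: int
-- ) -> List[List[int]]:
--     """Bucket scatter: classify each element by the inverse boundary map
--     (which segment does position j fall into?) and append it to that bucket,
--     instead of slicing the sequence segment by segment."""
--     out: List[List[int]] = [[] for _ in range(n_segments)]
--     if perm:
--         base, rem = divmod(len(perm), n_segments)
--         cut = rem * (base + 1)  # first index owned by a short segment
--         for j, x in enumerate(perm):
--             s = j // (base + 1) if j < cut else rem + (j - cut) // base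
--             out[s].append(x)
--     return out
-- ===== Notes on version B (the rewrite author's own statement) =====
-- stated objective: alternative
-- what changed: B inverts the direction of the computation: instead of A's per-segment loop that slices the sequence with a running offset (plus an n==0 guard), B classifies each element independently through the inverse boundary map j -> segment(j) and scatters it into a pre-built bucket list in one pass over the elements.
-- outside the precondition, e.g. on split_train_indices_into_segments([1, 2], -2): A returns [], B raises IndexError
import Mathlib
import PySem

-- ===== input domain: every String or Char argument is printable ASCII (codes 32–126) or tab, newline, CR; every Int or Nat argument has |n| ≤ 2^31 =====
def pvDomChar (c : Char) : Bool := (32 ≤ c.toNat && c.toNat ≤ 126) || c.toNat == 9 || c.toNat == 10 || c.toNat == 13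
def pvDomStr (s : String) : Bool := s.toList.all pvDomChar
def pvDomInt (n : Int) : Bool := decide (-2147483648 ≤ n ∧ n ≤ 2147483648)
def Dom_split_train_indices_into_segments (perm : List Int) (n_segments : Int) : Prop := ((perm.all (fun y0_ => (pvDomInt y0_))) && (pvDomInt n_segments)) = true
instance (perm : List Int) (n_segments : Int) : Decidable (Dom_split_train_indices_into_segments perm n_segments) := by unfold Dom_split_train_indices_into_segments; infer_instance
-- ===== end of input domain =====

-- B replaces A's per-segment slicing loop (n==0 guard + running offset) by a per-element
-- bucket scatter through the inverse boundary map (objective: alternative algorithm, same cost).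


-- ===== PORT A =====
def split_train_indices_into_segments (perm : List Int) (n_segments : Int) : List (List Int) :=
  let n : Int := PySem.List.len perm
  if n = 0 then
    (PySem.List.pyRange 0 n_segments 1).map (fun _ => ([] : List Int))
  else
    let base := PySem.Int.floordiv n n_segments
    let rem := PySem.Int.mod n n_segments
    -- out/off loop: state = (out, off), one step per s in range(n_segments)
    ((PySem.List.pyRange 0 n_segments 1).foldl
      (fun (st : List (List Int) × Int) s =>
        let ln := base + (if s < rem then (1 : Int) else 0)
        (st.1 ++ [PySem.List.slice perm (some st.2) (some (st.2 + ln))], st.2 + ln))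
      ([], 0)).1

-- ===== PORT B =====
def split_train_indices_into_segments_alt (perm : List Int) (n_segments : Int) : List (List Int) :=
  let out0 := (PySem.List.pyRange 0 n_segments 1).map (fun _ => ([] : List Int))
  if perm = [] then out0
  else
    let n : Int := PySem.List.len perm
    let base := PySem.Int.floordiv n n_segments
    let rem := PySem.Int.mod n n_segments
    let cut := rem * (base + 1)
    -- for j, x in enumerate(perm): out[s(j)].append(x), s(j) the inverse boundary map
    (PySem.List.enumerate perm 0).foldl
      (fun out jx =>
        let s : Int := if jx.1 < cut then PySem.Int.floordiv jx.1 (base + 1)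
                       else rem + PySem.Int.floordiv (jx.1 - cut) base
        PySem.List.pySetD out s (PySem.List.pyGetD out s [] ++ [jx.2]))
      out0

-- ===== PRECONDITION & SPEC =====
-- Pre_ excludes nonempty perm with n_segments ≤ 0: there A raises ZeroDivisionError (at 0) or
-- returns [] silently discarding the whole sequence (negative), while B's bucket indexing raises.
def Pre_split_train_indices_into_segments (perm : List Int) (n_segments : Int) : Prop := 0 < n_segments ∨ perm = []
instance (perm : List Int) (n_segments : Int) : Decidable (Pre_split_train_indices_into_segments perm n_segments) := by unfold Pre_split_train_indices_into_segments; infer_instance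
def pvWitness_split_train_indices_into_segments : List Int × Int := ([4, 0, 3, 1, 2], 3)

def Spec_split_train_indices_into_segments (perm : List Int) (n_segments : Int) (out : List (List Int)) : Prop := out = split_train_indices_into_segments_alt perm n_segments
instance (perm : List Int) (n_segments : Int) (out : List (List Int)) : Decidable (Spec_split_train_indices_into_segments perm n_segments out) := by unfold Spec_split_train_indices_into_segments; infer_instance

-- ===== CLAIM (what is proved, stated in full; the proofs are below) =====
def Claim_equal_split_train_indices_into_segments : Prop := ∀ (perm : List Int) (n_segments : Int), Dom_split_train_indices_into_segments perm n_segments → Pre_split_train_indices_into_segments perm n_segments → Spec_split_train_indices_into_segments perm n_segments (split_train_indices_into_segments perm n_segments)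

-- ===== LEMMAS AND PROOFS =====

-- Common closed form both ports are reduced to.
-- pvBnd b r i = start of segment i when the first r of the K segments get b+1 elements;
def pvBnd (b r i : Nat) : Nat := i * b + min i r
-- pvCf perm b r K t = the K buckets once the first t elements are placed;
def pvCf (perm : List Int) (b r K t : Nat) : List (List Int) :=
  (List.range K).map (fun i => (perm.drop (pvBnd b r i)).take (min (pvBnd b r (i+1)) t - pvBnd b r i))
-- pvSeg b r t = the segment owning position t (B's inverse boundary map, in Nat).
def pvSeg (b r t : Nat) : Nat := if t < r * (b+1) then t / (b+1) else r + (t - r*(b+1)) / b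

theorem pvBnd_mono (b r : Nat) {i j : Nat} (h : i ≤ j) : pvBnd b r i ≤ pvBnd b r j := by
  have := Nat.mul_le_mul_right b h
  unfold pvBnd; omega

theorem pvBnd_le (b r K i : Nat) (h : i ≤ K) : pvBnd b r i ≤ b * K + r := by
  have h1 : i * b ≤ K * b := Nat.mul_le_mul_right b h
  have h2 : K * b = b * K := Nat.mul_comm K b
  unfold pvBnd; omega

theorem pvSeg_spec (b r K t : Nat) (hr : r < K) (ht : t < b * K + r) :
    pvSeg b r t < K ∧ pvBnd b r (pvSeg b r t) ≤ t ∧ t < pvBnd b r (pvSeg b r t + 1) := by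
  unfold pvSeg pvBnd
  by_cases hc : t < r * (b+1)
  · rw [if_pos hc]
    have h1 : (b+1) * (t/(b+1)) + t % (b+1) = t := Nat.div_add_mod t (b+1)
    have h2 : t % (b+1) < b+1 := Nat.mod_lt t (by omega)
    have hqr : t/(b+1) < r := (Nat.div_lt_iff_lt_mul (show 0 < b+1 by omega)).2 hc
    have e1 : (b+1) * (t/(b+1)) = (t/(b+1)) * b + t/(b+1) := by ring
    have e2 : (t/(b+1)+1) * b = (t/(b+1)) * b + b := by ring
    omega
  · rw [if_neg hc]
    rw [Nat.not_lt] at hc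
    have hb : 0 < b := by
      rcases Nat.eq_zero_or_pos b with h0 | h
      · subst h0; simp at hc; omega
      · exact h
    have h1 : b * ((t - r*(b+1))/b) + (t - r*(b+1)) % b = t - r*(b+1) := Nat.div_add_mod _ b
    have h2 : (t - r*(b+1)) % b < b := Nat.mod_lt _ hb
    have e1 : r * (b+1) = r * b + r := by ring
    have hqK : (t - r*(b+1))/b < K - r := by
      apply (Nat.div_lt_iff_lt_mul hb).2
      have e2 : (K - r) * b = K * b - r * b := Nat.sub_mul K r b
      have e3 : r * b ≤ K * b := Nat.mul_le_mul_right b (le_of_lt hr)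
      have e4 : b * K = K * b := Nat.mul_comm b K
      omega
    have e5 : (r + (t - r*(b+1))/b) * b = r * b + ((t - r*(b+1))/b) * b := by ring
    have e6 : (r + (t - r*(b+1))/b + 1) * b = r * b + ((t - r*(b+1))/b) * b + b := by ring
    have e7 : b * ((t - r*(b+1))/b) = ((t - r*(b+1))/b) * b := Nat.mul_comm _ _
    generalize hq : (t - r*(b+1))/b = q at h1 hqK e5 e6 e7 ⊢
    generalize hmv : t - r*(b+1) = m at h1 h2 ⊢
    omega

-- replacing element s of a map over range, as a map
theorem pvSetMap (K s : Nat) (g : Nat → List Int) (v : List Int) :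
    ((List.range K).map g).set s v = (List.range K).map (fun i => if i = s then v else g i) := by
  apply List.ext_getElem
  · simp
  · intro i h1 h2
    simp only [List.getElem_set, List.getElem_map, List.getElem_range]
    by_cases h : s = i
    · subst h; simp
    · rw [if_neg h, if_neg (fun hh => h hh.symm)]

theorem pvGetDMap (K s : Nat) (g : Nat → List Int) (hs : s < K) :
    ((List.range K).map g).getD s [] = g s := by
  simp [List.getD, hs]

-- enumerate, indexed
theorem pvEnumGet? (xs : List Int) (s : Int) (t : Nat) :
    (PySem.List.enumerate xs s)[t]? = xs[t]?.map (fun x => (s + (t : Int), x)) := by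
  induction xs generalizing s t with
  | nil => simp [PySem.List.enumerate_nil]
  | cons y ys ih =>
    rw [PySem.List.enumerate_cons]
    cases t with
    | zero => simp
    | succ t' =>
      simp only [List.getElem?_cons_succ, ih (s+1) t']
      have : s + 1 + (t' : Int) = s + ((t' : Nat) + 1 : Nat) := by push_cast; ring
      rw [this]

-- B's Int segment expression equals the Nat inverse boundary map
theorem pvSegCast (b r t : Nat) :
    (if (t : Int) < (r : Int) * ((b : Int) + 1) then PySem.Int.floordiv (t : Int) ((b : Int) + 1)
     else (r : Int) + PySem.Int.floordiv ((t : Int) - (r : Int) * ((b : Int) + 1)) (b : Int))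
    = ((pvSeg b r t : Nat) : Int) := by
  have hc : (r : Int) * ((b : Int) + 1) = ((r * (b+1) : Nat) : Int) := by push_cast; ring
  unfold pvSeg
  by_cases h : t < r * (b+1)
  · rw [if_pos (by exact_mod_cast hc ▸ (by exact_mod_cast h : ((t:Int)) < ((r*(b+1) : Nat) : Int)))]
    rw [if_pos h]
    have : ((b : Int) + 1) = ((b + 1 : Nat) : Int) := by push_cast; ring
    rw [this, PySem.Int.floordiv_natCast]
  · have h' : ¬ ((t : Int) < (r : Int) * ((b : Int) + 1)) := by
      rw [hc]; exact_mod_cast h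
    rw [if_neg h', if_neg h]
    have hle : r * (b+1) ≤ t := Nat.le_of_not_lt h
    have e : (t : Int) - (r : Int) * ((b : Int) + 1) = ((t - r * (b+1) : Nat) : Int) := by
      rw [hc]; omega
    rw [e, PySem.Int.floordiv_natCast]
    push_cast; ring

-- effect of one step of B's fold on the partial buckets
theorem pvStep (perm : List Int) (K b r t : Nat) (hr : r < K)
    (hn : perm.length = b * K + r) (ht : t < perm.length) (x : Int) (hx : perm[t]? = some x) :
    PySem.List.pySetD (pvCf perm b r K t)
      (if (t : Int) < (r : Int) * ((b : Int) + 1) then PySem.Int.floordiv (t : Int) ((b : Int) + 1)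
       else (r : Int) + PySem.Int.floordiv ((t : Int) - (r : Int) * ((b : Int) + 1)) (b : Int))
      (PySem.List.pyGetD (pvCf perm b r K t)
        (if (t : Int) < (r : Int) * ((b : Int) + 1) then PySem.Int.floordiv (t : Int) ((b : Int) + 1)
         else (r : Int) + PySem.Int.floordiv ((t : Int) - (r : Int) * ((b : Int) + 1)) (b : Int)) [] ++ [x])
    = pvCf perm b r K (t+1) := by
  rw [pvSegCast b r t]
  obtain ⟨hsK, hlo, hhi⟩ := pvSeg_spec b r K t hr (hn ▸ ht)
  rw [PySem.List.pySetD_natCast, PySem.List.pyGetD_natCast]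
  unfold pvCf
  rw [pvGetDMap K (pvSeg b r t) _ hsK, pvSetMap]
  apply List.map_congr_left
  intro i hi
  have hiK : i < K := List.mem_range.mp hi
  by_cases he : i = pvSeg b r t
  · rw [if_pos he]
    rw [← he] at hlo hhi ⊢
    have h1 : min (pvBnd b r (i+1)) t = t := min_eq_right (le_of_lt hhi)
    have h2 : min (pvBnd b r (i+1)) (t+1) = t + 1 := min_eq_right hhi
    rw [h1, h2]
    have h3 : t + 1 - pvBnd b r i = (t - pvBnd b r i) + 1 := by omega
    rw [h3, List.take_add_one]
    congr 1
    rw [List.getElem?_drop]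
    have h4 : pvBnd b r i + (t - pvBnd b r i) = t := by omega
    rw [h4, hx]
    rfl
  · rw [if_neg he]
    rcases Nat.lt_or_ge i (pvSeg b r t) with hlt | hge
    · have : pvBnd b r (i+1) ≤ pvBnd b r (pvSeg b r t) := pvBnd_mono b r hlt
      have : min (pvBnd b r (i+1)) t = min (pvBnd b r (i+1)) (t+1) := by omega
      rw [this]
    · have hgt : pvSeg b r t + 1 ≤ i := by omega
      have hge2 : pvBnd b r (pvSeg b r t + 1) ≤ pvBnd b r i := pvBnd_mono b r hgt
      have z1 : min (pvBnd b r (i+1)) t - pvBnd b r i = 0 := by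
        have := pvBnd_mono b r (Nat.le_succ i)
        omega
      have z2 : min (pvBnd b r (i+1)) (t+1) - pvBnd b r i = 0 := by
        have := pvBnd_mono b r (Nat.le_succ i)
        omega
      rw [z1, z2]

-- B's loop: prefix invariant
theorem pvBloop (perm : List Int) (K b r : Nat) (hr : r < K)
    (hn : perm.length = b * K + r) :
    ∀ t, t ≤ perm.length →
    ((PySem.List.enumerate perm 0).take t).foldl
      (fun out jx =>
        PySem.List.pySetD out
          (if jx.1 < (r : Int) * ((b : Int) + 1) then PySem.Int.floordiv jx.1 ((b : Int) + 1)
           else (r : Int) + PySem.Int.floordiv (jx.1 - (r : Int) * ((b : Int) + 1)) (b : Int))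
          (PySem.List.pyGetD out
            (if jx.1 < (r : Int) * ((b : Int) + 1) then PySem.Int.floordiv jx.1 ((b : Int) + 1)
             else (r : Int) + PySem.Int.floordiv (jx.1 - (r : Int) * ((b : Int) + 1)) (b : Int)) [] ++ [jx.2]))
      ((PySem.List.pyRange 0 (K : Int) 1).map (fun _ => ([] : List Int)))
    = pvCf perm b r K t := by
  intro t
  induction t with
  | zero =>
    intro _
    rw [List.take_zero, List.foldl_nil, PySem.List.pyRange_one]
    simp [pvCf, Function.comp_def, List.map_const']
  | succ t ih =>
    intro h
    have ht : t < perm.length := by omega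
    have hx : perm[t]? = some perm[t] := List.getElem?_eq_getElem ht
    have htake : (PySem.List.enumerate perm 0).take (t+1)
        = (PySem.List.enumerate perm 0).take t ++ [((t : Int), perm[t])] := by
      rw [List.take_add_one]
      congr 1
      rw [pvEnumGet?, hx]
      simp
    rw [htake, List.foldl_append, ih (by omega), List.foldl_cons, List.foldl_nil]
    exact pvStep perm K b r t hr hn ht perm[t] hx

-- A's loop invariant (whole range; boundaries as the Int formula)
theorem pvLoop (perm : List Int) (base rem : Int) (hrem : 0 ≤ rem) (K : Nat) :
    (((List.range K).map (fun j : Nat => (0:Int) + (j:Int))).foldl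
      (fun (st : List (List Int) × Int) s =>
        (st.1 ++ [PySem.List.slice perm (some st.2) (some (st.2 + (base + (if s < rem then (1 : Int) else 0))))],
         st.2 + (base + (if s < rem then (1 : Int) else 0))))
      ([], 0))
    = ((List.range K).map (fun k : Nat => PySem.List.slice perm
          (some ((k:Int) * base + min (k:Int) rem))
          (some (((k:Int) + 1) * base + min ((k:Int) + 1) rem))),
       (K:Int) * base + min (K:Int) rem) := by
  induction K with
  | zero => simp; omega
  | succ K ih =>
    simp only [List.range_succ, List.map_append, List.foldl_append]
    rw [ih]
    simp only [List.foldl_cons, List.foldl_nil, List.map_cons, List.map_nil, Prod.mk.injEq,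
               zero_add]
    have hoff : (K:Int) * base + min (K:Int) rem + (base + (if (K:Int) < rem then (1:Int) else 0))
        = ((K:Int) + 1) * base + min ((K:Int) + 1) rem := by
      have hmul : ((K:Int) + 1) * base = (K:Int) * base + base := by ring
      rw [hmul]
      omega
    constructor
    · rw [hoff]
    · push_cast
      push_cast at hoff
      linarith [hoff]

-- A reduced to the closed form
theorem pvA_cf (perm : List Int) (K : Nat) (hne : perm ≠ []) :
    split_train_indices_into_segments perm (K : Int)
      = pvCf perm (perm.length / K) (perm.length % K) K perm.length := by
  have hz : ((perm.length : Int)) ≠ 0 := by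
    have : perm.length ≠ 0 := fun h => hne (List.eq_nil_of_length_eq_zero h)
    exact_mod_cast this
  unfold split_train_indices_into_segments
  simp only [PySem.List.len_eq]
  rw [if_neg hz]
  have hR : PySem.List.pyRange 0 (K:Int) 1
      = (List.range K).map (fun j : Nat => (0:Int) + (j:Int)) := by
    rw [PySem.List.pyRange_one]; norm_num
  rw [hR]
  simp only [PySem.Int.floordiv_natCast, PySem.Int.mod_natCast]
  rw [congrArg Prod.fst (pvLoop perm _ _ (by positivity) K)]
  unfold pvCf
  apply List.map_congr_left
  intro k hk
  have hkK : k < K := List.mem_range.mp hk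
  have e1 : ((k:Int)) * ((perm.length / K : Nat) : Int) + min (k:Int) ((perm.length % K : Nat) : Int)
      = ((pvBnd (perm.length / K) (perm.length % K) k : Nat) : Int) := by
    unfold pvBnd; push_cast; ring
  have e2 : ((k:Int) + 1) * ((perm.length / K : Nat) : Int) + min ((k:Int)+1) ((perm.length % K : Nat) : Int)
      = ((pvBnd (perm.length / K) (perm.length % K) (k+1) : Nat) : Int) := by
    unfold pvBnd; push_cast; ring
  rw [e1, e2, PySem.List.slice_natCast]
  have hle : pvBnd (perm.length / K) (perm.length % K) (k+1) ≤ perm.length := by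
    have := pvBnd_le (perm.length / K) (perm.length % K) K (k+1) hkK
    have hdm := Nat.div_add_mod perm.length K
    have : perm.length / K * K = K * (perm.length / K) := Nat.mul_comm _ _
    omega
  rw [min_eq_left hle]

-- B reduced to the same closed form
theorem pvB_cf (perm : List Int) (K : Nat) (hK : 0 < K) (hne : perm ≠ []) :
    split_train_indices_into_segments_alt perm (K : Int)
      = pvCf perm (perm.length / K) (perm.length % K) K perm.length := by
  unfold split_train_indices_into_segments_alt
  rw [if_neg hne]
  simp only [PySem.List.len_eq, PySem.Int.floordiv_natCast, PySem.Int.mod_natCast]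
  have hfull : PySem.List.enumerate perm 0
      = (PySem.List.enumerate perm 0).take perm.length := by
    rw [← PySem.List.length_enumerate perm 0, List.take_length]
  rw [hfull]
  exact pvBloop perm K (perm.length / K) (perm.length % K)
    (Nat.mod_lt _ hK) (by rw [Nat.mul_comm]; exact (Nat.div_add_mod perm.length K).symm) _ le_rfl

-- ===== VERDICT (by name: the statement is the Claim_ definition above) =====
theorem split_train_indices_into_segments_spec : Claim_equal_split_train_indices_into_segments := by
  intro perm ns hdom hpre
  unfold Spec_split_train_indices_into_segments
  by_cases hperm : perm = []
  · subst hperm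
    simp [split_train_indices_into_segments, split_train_indices_into_segments_alt,
          PySem.List.len]
  · have hpos : 0 < ns := by
      rcases hpre with h | h
      · exact h
      · exact absurd h hperm
    obtain ⟨K, rfl⟩ : ∃ K : Nat, ns = (K : Int) := ⟨ns.toNat, by omega⟩
    have hK : 0 < K := by exact_mod_cast hpos
    rw [pvA_cf perm K hperm, pvB_cf perm K hK hperm]
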